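-- pv_equiv track=rewrite | github.com/Habeomsu/BaekJoon | 프로그래머스/메뉴 리뉴얼.py | solution
-- ===== SOURCE A (Python) =====
-- from itertools import combinations
--
-- def solution(orders, course):
--     answer = []
--     order_dict = {}
--
--     ## 딕셔너리 만들기
--     for order in orders:
--         for i in range(2, len(order) + 1):
--             for j in combinations(order, i):
--                 j = list(j)
--                 j = sorted(j)
--                 j = "".join(j)
--                 if j in order_dict:
--                     order_dict[j] += 1
--                 else:
--                     order_dict[j] = 1
--
--     for i in course:
--         now_result = find_order(order_dict, i)
--         for j in now_result:
--             answer.append(j)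
--
--     answer = sorted(answer)
--     return answer
--
-- def find_order(dict, course):
--     arr = []
--     result = []
--     for i in dict:
--         if len(i) == course:
--             arr.append([dict[i], i])
--     if len(arr) == 0:
--         return result
--     else:
--         arr = sorted(arr, key=lambda x: [-x[0], x[1]])
--         if arr[0][0] == 1:
--             return result
--         else:
--             now_num = arr[0][0]
--             while arr:
--                 next = arr.pop(0)
--                 if now_num == next[0]:
--                     result.append(next[1])
--                 else:
--                     break
--     return result
-- ===== SOURCE B (Python) =====
-- from itertools import combinations
--
-- def _winners_for(orders, c):
--     # most frequent size-c subsets (count >= 2), as dict-order keys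
--     if c < 2:
--         return []
--     cnt = {}
--     for order in orders:
--         if c <= len(order):
--             for combo in combinations(order, c):
--                 key = "".join(sorted(combo))
--                 cnt[key] = cnt.get(key, 0) + 1
--     if not cnt:
--         return []
--     m = max(cnt.values())
--     if m < 2:
--         return []
--     return [k for k, v in cnt.items() if v == m]
--
-- def solution(orders, course):
--     # Only count the subset sizes actually requested, once per distinct size;
--     # sizes that no order can reach win nothing.
--     maxlen = 0
--     for o in orders:
--         maxlen = max(maxlen, len(o))
--     winners = {}
--     answer = []
--     for c in course:
--         if c not in winners:
--             winners[c] = _winners_for(orders, c) if 2 <= c <= maxlen else []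
--         answer.extend(winners[c])
--     return sorted(answer)
-- ===== Notes on version B (the rewrite author's own statement) =====
-- stated objective: faster
-- what changed: A enumerates every subset of size 2..len(order) of every order into one global counter and filters it by key length per course size; B computes winners only for the subset sizes actually requested (memoized per distinct size, skipping sizes <2 or beyond the longest order), counting only size-c subsets and taking the keys with the maximal count when it is >= 2.
import Mathlib
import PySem

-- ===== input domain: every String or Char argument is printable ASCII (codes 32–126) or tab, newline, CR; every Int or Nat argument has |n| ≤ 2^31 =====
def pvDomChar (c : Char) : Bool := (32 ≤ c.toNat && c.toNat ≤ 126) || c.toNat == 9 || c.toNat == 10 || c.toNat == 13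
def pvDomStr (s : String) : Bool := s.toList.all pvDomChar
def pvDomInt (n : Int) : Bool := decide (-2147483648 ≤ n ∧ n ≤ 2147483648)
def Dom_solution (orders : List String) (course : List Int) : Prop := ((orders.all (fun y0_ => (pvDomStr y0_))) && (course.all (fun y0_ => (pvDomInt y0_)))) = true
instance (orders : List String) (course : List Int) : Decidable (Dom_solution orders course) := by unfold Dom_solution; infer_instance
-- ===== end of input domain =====

-- B only counts subset sizes that occur in `course` (A counts every size from 2 to len(order)); same results, fewer combinations enumerated.

-- ===== PORT A =====
-- "".join(sorted(list(j))) — the canonical key of a combination (both Pythons compute this expression)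
def pvKey (j : List Char) : String := String.ofList (PySem.List.sorted j (fun c => c) false)

-- the `while arr: next = arr.pop(0); if now_num == next[0]: result.append(next[1]) else: break` loop of find_order
def pvFindTake (now : Int) : List (Int × String) → List String → List String
  | [], res => res
  | x :: rest, res => if now == x.1 then pvFindTake now rest (res ++ [x.2]) else res


def pvFindOrder (d : PySem.Dict String Int) (course : Int) : List String :=
  let arr : List (Int × String) :=
    d.keys.foldl (fun arr k => if PySem.Str.len k == course then arr ++ [(d.getD k 0, k)] else arr) []
  if arr.length == 0 then []
  else
    let arr2 := PySem.List.sorted2 arr (fun x => -x.1) (fun x => x.2)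
    match arr2 with
    | [] => []
    | x0 :: _ => if x0.1 == 1 then [] else pvFindTake x0.1 arr2 []


-- the dictionary-building triple loop of A
def pvDictA (orders : List String) : PySem.Dict String Int :=
  orders.foldl (fun d order =>
      (PySem.List.pyRange 2 (PySem.Str.len order + 1) 1).foldl (fun d i =>
        (PySem.List.combinations order.toList i.toNat).foldl (fun d j =>
          let key := pvKey j
          if d.contains key then d.insert key (d.getD key 0 + 1) else d.insert key 1) d) d)
    PySem.Dict.empty

def solution (orders : List String) (course : List Int) : List String :=
  let dict := pvDictA orders
  let answer := course.foldl (fun ans i => (pvFindOrder dict i).foldl (fun ans j => ans ++ [j]) ans) []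
  PySem.List.sorted answer (fun x => x) false

-- ===== PORT B =====
-- B's per-size counter (`cnt` in Source B)
def pvCntB (orders : List String) (c : Int) : PySem.Dict String Int :=
  orders.foldl (fun cnt order =>
      if c ≤ PySem.Str.len order then
        (PySem.List.combinations order.toList c.toNat).foldl (fun cnt combo =>
          let key := pvKey combo
          cnt.insert key (cnt.getD key 0 + 1)) cnt
      else cnt)
    PySem.Dict.empty

-- port of B's helper _winners_for
def pvWinners (orders : List String) (c : Int) : List String :=
  if c < 2 then []
  else
    let cnt := pvCntB orders c
    if cnt.size == 0 then []
    else
      match PySem.List.max? cnt.values (fun v => v) with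
      | none => []  -- unreachable: cnt is nonempty here
      | some m =>
        if m < 2 then [] else (cnt.items.filter (fun p => p.2 == m)).map (fun p => p.1)

def solution_alt (orders : List String) (course : List Int) : List String :=
  let maxlen := orders.foldl (fun m o => max m (PySem.Str.len o)) 0
  let st := course.foldl (fun st c =>
      let winners := if st.1.contains c then st.1
        else st.1.insert c (if 2 ≤ c ∧ c ≤ maxlen then pvWinners orders c else [])
      (winners, st.2 ++ winners.getD c []))
    ((PySem.Dict.empty : PySem.Dict Int (List String)), ([] : List String))
  PySem.List.sorted st.2 (fun x => x) false

-- ===== PRECONDITION & SPEC =====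
def Spec_solution (orders : List String) (course : List Int) (out : List String) : Prop := out = solution_alt orders course
instance (orders : List String) (course : List Int) (out : List String) : Decidable (Spec_solution orders course out) := by unfold Spec_solution; infer_instance

-- ===== CLAIM (what is proved, stated in full; the proofs are below) =====
def Claim_equal_solution : Prop := ∀ (orders : List String) (course : List Int), Dom_solution orders course → Spec_solution orders course (solution orders course)

-- ===== LEMMAS AND PROOFS =====

-- the stream of keys A's triple loop counts (all subset sizes 2..len(order))
def pvSA (orders : List String) : List String :=
  orders.flatMap (fun o =>
    (PySem.List.pyRange 2 (PySem.Str.len o + 1) 1).flatMap (fun i =>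
      (PySem.List.combinations o.toList i.toNat).map pvKey))

-- the stream of keys B's loop counts for one subset size r
def pvSB (orders : List String) (r : Nat) : List String :=
  orders.flatMap (fun o => (PySem.List.combinations o.toList r).map pvKey)

lemma pvStepA (d : PySem.Dict String Int) (k : String) :
    (if d.contains k then d.insert k (d.getD k 0 + 1) else d.insert k 1) = d.insert k (d.getD k 0 + 1) := by
  by_cases h : d.contains k
  · simp [h]
  · simp only [Bool.not_eq_true] at h
    rw [PySem.Dict.getD_of_not_contains _ _ h]
    simp [h]

lemma pvDictA_eq (orders : List String) : pvDictA orders = PySem.Dict.counter (pvSA orders) := by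
  rw [← PySem.Dict.foldl_insert_getD_add_one_eq_counter]
  unfold pvDictA pvSA
  simp only [List.foldl_flatMap, List.foldl_map, pvStepA]

lemma pvCntB_eq (orders : List String) (c : Int) (hc : 2 ≤ c) :
    pvCntB orders c = PySem.Dict.counter (pvSB orders c.toNat) := by
  rw [← PySem.Dict.foldl_insert_getD_add_one_eq_counter]
  unfold pvCntB pvSB
  simp only [List.foldl_flatMap, List.foldl_map]
  apply PySem.List.foldl_congr_mem
  intro acc o _
  by_cases h : c ≤ PySem.Str.len o
  · rw [if_pos h]
  · rw [if_neg h]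
    have hlen : PySem.Str.len o = (o.toList.length : Int) := by simp [pysem]
    rw [show PySem.List.combinations o.toList c.toNat = [] from by
      apply PySem.List.combinations_eq_nil_of_length_lt
      rw [hlen] at h
      omega]
    simp

lemma pvKey_len (j : List Char) : (pvKey j).toList.length = j.length := by
  rw [pvKey, String.toList_ofList, PySem.List.length_sorted]

lemma pvLen_mem_SB (orders : List String) (r : Nat) (k : String) (h : k ∈ pvSB orders r) :
    k.toList.length = r := by
  simp only [pvSB, List.mem_flatMap, List.mem_map] at h
  obtain ⟨o, -, j, hj, rfl⟩ := h
  rw [pvKey_len]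
  exact PySem.List.length_of_mem_combinations hj

lemma pvLen_mem_SA (orders : List String) (k : String) (h : k ∈ pvSA orders) :
    2 ≤ k.toList.length := by
  simp only [pvSA, List.mem_flatMap, List.mem_map] at h
  obtain ⟨o, -, i, hi, j, hj, rfl⟩ := h
  rw [pvKey_len, PySem.List.length_of_mem_combinations hj]
  rw [PySem.List.mem_pyRange_one] at hi
  omega

lemma pvCount_flatMap {α : Type} (l : List α) (f : α → List String) (k : String) :
    ((l.flatMap f).count k) = (l.map (fun i => (f i).count k)).sum := by
  induction l with
  | nil => simp
  | cons x xs ih => simp [List.count_append, ih]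

lemma pvCount_eq (orders : List String) (k : String) (r : Nat) (hr : 2 ≤ r)
    (hk : k.toList.length = r) :
    (pvSA orders).count k = (pvSB orders r).count k := by
  unfold pvSA pvSB
  rw [pvCount_flatMap, pvCount_flatMap]
  congr 1
  apply List.map_congr_left
  intro o _
  rw [pvCount_flatMap]
  have hzero : ∀ i : Int, 2 ≤ i → i ≠ (r : Int) →
      ((PySem.List.combinations o.toList i.toNat).map pvKey).count k = 0 := by
    intro i h2 hne
    rw [List.count_eq_zero]
    intro hmem
    simp only [List.mem_map] at hmem
    obtain ⟨j, hj, rfl⟩ := hmem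
    rw [pvKey_len, PySem.List.length_of_mem_combinations hj] at hk
    omega
  have hlen : PySem.Str.len o = (o.toList.length : Int) := by simp [pysem]
  by_cases hle : r ≤ o.toList.length
  · have hsplit : PySem.List.pyRange 2 (PySem.Str.len o + 1) 1
        = PySem.List.pyRange 2 (r : Int) 1 ++ PySem.List.pyRange (r : Int) (PySem.Str.len o + 1) 1 :=
      PySem.List.pyRange_one_append _ _ _ (by omega) (by rw [hlen]; omega)
    have hcons : PySem.List.pyRange (r : Int) (PySem.Str.len o + 1) 1
        = (r : Int) :: PySem.List.pyRange ((r : Int) + 1) (PySem.Str.len o + 1) 1 :=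
      PySem.List.pyRange_one_cons (by rw [hlen]; omega)
    rw [hsplit, hcons]
    simp only [List.map_append, List.map_cons, List.sum_append, List.sum_cons]
    have h1 : ((PySem.List.pyRange 2 (r : Int) 1).map
        (fun i => ((PySem.List.combinations o.toList i.toNat).map pvKey).count k)).sum = 0 := by
      apply List.sum_eq_zero
      intro x hx
      simp only [List.mem_map] at hx
      obtain ⟨i, hi, rfl⟩ := hx
      rw [PySem.List.mem_pyRange_one] at hi
      exact hzero i hi.1 (by omega)
    have h2 : ((PySem.List.pyRange ((r : Int) + 1) (PySem.Str.len o + 1) 1).map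
        (fun i => ((PySem.List.combinations o.toList i.toNat).map pvKey).count k)).sum = 0 := by
      apply List.sum_eq_zero
      intro x hx
      simp only [List.mem_map] at hx
      obtain ⟨i, hi, rfl⟩ := hx
      rw [PySem.List.mem_pyRange_one] at hi
      exact hzero i (by omega) (by omega)
    rw [h1, h2]
    simp
  · have hnil : PySem.List.combinations o.toList r = [] := by
      apply PySem.List.combinations_eq_nil_of_length_lt
      omega
    rw [hnil]
    simp only [List.map_nil, List.count_nil]
    apply List.sum_eq_zero
    intro x hx
    simp only [List.mem_map] at hx
    obtain ⟨i, hi, rfl⟩ := hx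
    rw [PySem.List.mem_pyRange_one, hlen] at hi
    exact hzero i hi.1 (by omega)


lemma pvFindTake_eq (now : Int) (l : List (Int × String)) (res : List String) :
    pvFindTake now l res = res ++ (l.takeWhile (fun x => now == x.1)).map (·.2) := by
  induction l generalizing res with
  | nil => simp [pvFindTake]
  | cons x rest ih =>
    rw [pvFindTake, List.takeWhile_cons]
    by_cases h : now == x.1
    · rw [if_pos h, if_pos h, ih]
      simp
    · rw [if_neg h, if_neg h]
      simp

theorem pvSorted2_eq (xs : List (Int × String)) :
    PySem.List.sorted2 xs (fun x => -x.1) (fun x => x.2) false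
    = PySem.List.sorted xs (fun x => toLex (-x.1, x.2)) false := by
  rw [PySem.List.sorted_eq_foldl_insertBy, PySem.List.sorted2]
  have hb : (fun (a b : Int × String) => decide ((toLex (-a.1, a.2) : Lex (Int × String)) < toLex (-b.1, b.2)))
          = (fun (a b : Int × String) => decide (-a.1 < -b.1) || (!decide (-b.1 < -a.1) && decide (a.2 < b.2))) := by
    funext a b
    rcases lt_trichotomy a.1 b.1 with h | h | h
    · simp only [Prod.Lex.toLex_lt_toLex]
      simp [h]
      intro h1 _
      omega
    · simp [Prod.Lex.toLex_lt_toLex, h]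
    · simp [Prod.Lex.toLex_lt_toLex, h]
  rw [hb]
  simp


lemma pvTakeWhile_filter (l : List (Int × String)) (m : Int)
    (hpw : l.Pairwise (fun a b => (toLex (-a.1, a.2) : Lex (Int × String)) ≤ toLex (-b.1, b.2)))
    (hmax : ∀ y ∈ l, y.1 ≤ m) :
    l.takeWhile (fun x => m == x.1) = l.filter (fun x => m == x.1) := by
  conv_rhs => rw [← List.takeWhile_append_dropWhile (p := fun x => m == x.1) (l := l)]
  rw [List.filter_append, List.filter_eq_self.mpr (fun a ha => List.mem_takeWhile_imp (p := fun x => m == x.1) (l := l) ha)]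
  have hnil : (l.dropWhile (fun x => m == x.1)).filter (fun x => m == x.1) = [] := by
    cases hd : l.dropWhile (fun x => m == x.1) with
    | nil => simp
    | cons y0 ys =>
      rw [List.filter_eq_nil_iff]
      intro x hx
      have hsub : (y0 :: ys).Sublist l := hd ▸ List.dropWhile_sublist _
      have hy0 : ¬ (m == y0.1) = true := by
        have hne : l.dropWhile (fun x => m == x.1) ≠ [] := by simp [hd]
        have := List.head_dropWhile_not (fun x : Int × String => m == x.1) hne
        simpa [hd] using this
      simp only [beq_iff_eq] at hy0
      have hy0le : y0.1 ≤ m := hmax y0 (hsub.mem (by simp))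
      have hy0lt : y0.1 < m := by omega
      rcases List.mem_cons.mp hx with rfl | hx
      · simp; omega
      · have hpw' : (y0 :: ys).Pairwise (fun a b => (toLex (-a.1, a.2) : Lex (Int × String)) ≤ toLex (-b.1, b.2)) :=
          hpw.sublist hsub
        have hrel := (List.pairwise_cons.mp hpw').1 x hx
        rw [Prod.Lex.toLex_le_toLex] at hrel
        have : x.1 ≤ y0.1 := by rcases hrel with h | ⟨h, -⟩ <;> omega
        simp; omega
  rw [hnil, List.append_nil]

lemma pvContrib_perm (orders : List String) (c : Int) :
    (pvFindOrder (pvDictA orders) c).Perm (pvWinners orders c) := by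
  rw [pvDictA_eq]
  have hlen : ∀ k : String, PySem.Str.len k = (k.toList.length : Int) := by
    intro k; simp [pysem]
  unfold pvFindOrder pvWinners
  rw [PySem.Dict.keys_counter, PySem.List.foldl_append_if]
  simp only [List.nil_append]
  by_cases hc : c < 2
  · have hfa : (PySem.Set.ofList (pvSA orders)).filter (fun k => PySem.Str.len k == c) = [] := by
      rw [List.filter_eq_nil_iff]
      intro k hk
      have h2 := pvLen_mem_SA orders k ((PySem.Set.mem_ofList _ _).mp hk)
      rw [hlen k]
      simp only [beq_iff_eq]
      omega
    rw [hfa]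
    simp [hc]
  · have hc2 : 2 ≤ c := by omega
    have hr2 : 2 ≤ c.toNat := by omega
    have hcr : (c.toNat : Int) = c := by omega
    have hmemFA : ∀ k, k ∈ (PySem.Set.ofList (pvSA orders)).filter (fun k => PySem.Str.len k == c)
        ↔ k ∈ PySem.Set.ofList (pvSB orders c.toNat) := by
      intro k
      rw [List.mem_filter, PySem.Set.mem_ofList, PySem.Set.mem_ofList]
      constructor
      · rintro ⟨hks, hlenk⟩
        rw [hlen k, beq_iff_eq] at hlenk
        have hklen : k.toList.length = c.toNat := by omega
        have hcnt := pvCount_eq orders k c.toNat hr2 hklen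
        rw [← List.count_pos_iff] at hks ⊢
        omega
      · intro hks
        have hklen := pvLen_mem_SB orders c.toNat k hks
        have hcnt := pvCount_eq orders k c.toNat hr2 hklen
        constructor
        · rw [← List.count_pos_iff] at hks ⊢
          omega
        · rw [hlen k, hklen]
          simp only [beq_iff_eq]
          exact hcr
    have hFAnodup : ((PySem.Set.ofList (pvSA orders)).filter (fun k => PySem.Str.len k == c)).Nodup :=
      (PySem.Set.nodup_ofList _).filter _
    have hSBnodup : (PySem.Set.ofList (pvSB orders c.toNat)).Nodup := PySem.Set.nodup_ofList _
    have hFAperm : ((PySem.Set.ofList (pvSA orders)).filter (fun k => PySem.Str.len k == c)).Perm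
        (PySem.Set.ofList (pvSB orders c.toNat)) :=
      (List.perm_ext_iff_of_nodup hFAnodup hSBnodup).mpr hmemFA
    have harr : ((PySem.Set.ofList (pvSA orders)).filter (fun k => PySem.Str.len k == c)).map
          (fun k => ((PySem.Dict.counter (pvSA orders)).getD k 0, k))
        = ((PySem.Set.ofList (pvSA orders)).filter (fun k => PySem.Str.len k == c)).map
          (fun k => (((pvSB orders c.toNat).count k : Int), k)) := by
      apply List.map_congr_left
      intro k hk
      have hks := (hmemFA k).mp hk
      have hklen := pvLen_mem_SB orders c.toNat k ((PySem.Set.mem_ofList _ _).mp hks)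
      rw [PySem.Dict.getD_counter, pvCount_eq orders k c.toNat hr2 hklen]
    rw [harr]
    rw [if_neg hc, pvCntB_eq orders c (by omega)]
    have hvals : (PySem.Dict.counter (pvSB orders c.toNat)).values
        = (PySem.Set.ofList (pvSB orders c.toNat)).map (fun k => ((pvSB orders c.toNat).count k : Int)) := by
      rw [PySem.Dict.values_eq_map_keys _ (PySem.Dict.nodup_keys_counter _) 0, PySem.Dict.keys_counter]
      exact List.map_congr_left (fun k _ => PySem.Dict.getD_counter _ _)
    by_cases hSB : PySem.Set.ofList (pvSB orders c.toNat) = []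
    · have hFA0 : (PySem.Set.ofList (pvSA orders)).filter (fun k => PySem.Str.len k == c) = [] := by
        rw [hSB] at hFAperm
        exact List.perm_nil.mp hFAperm
      have hsize : (PySem.Dict.counter (pvSB orders c.toNat)).size = 0 := by
        have := PySem.Dict.items_counter (pvSB orders c.toNat)
        rw [hSB] at this
        simp only [List.map_nil] at this
        simp [PySem.Dict.size, this]
      rw [hFA0, hsize]
      simp
    · have hFAne : (PySem.Set.ofList (pvSA orders)).filter (fun k => PySem.Str.len k == c) ≠ [] := by
        intro h
        rw [h] at hFAperm
        exact hSB (List.nil_perm.mp hFAperm)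
      have hsizene : ¬ ((PySem.Dict.counter (pvSB orders c.toNat)).size == 0) = true := by
        have hit := PySem.Dict.items_counter (pvSB orders c.toNat)
        simp only [PySem.Dict.size, hit, beq_iff_eq, List.length_map, List.length_eq_zero_iff]
        exact hSB
      have hcondA : ¬ (((((PySem.Set.ofList (pvSA orders)).filter (fun k => PySem.Str.len k == c)).map
            (fun k => (((pvSB orders c.toNat).count k : Int), k))).length == 0) = true) := by
        simp only [beq_iff_eq, List.length_map, List.length_eq_zero_iff]
        exact hFAne
      rw [if_neg hsizene, if_neg hcondA]
      rcases hm? : PySem.List.max? (PySem.Dict.counter (pvSB orders c.toNat)).values (fun v => v) with _ | m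
      · exfalso
        rw [PySem.List.max?_eq_none_iff] at hm?
        rw [hvals] at hm?
        simp only [List.map_eq_nil_iff] at hm?
        exact hSB hm?
      rw [pvSorted2_eq]
      rcases harr2 : PySem.List.sorted (((PySem.Set.ofList (pvSA orders)).filter (fun k => PySem.Str.len k == c)).map
            (fun k => (((pvSB orders c.toNat).count k : Int), k))) (fun x => toLex (-x.1, x.2)) false with _ | ⟨y0, t⟩
      · exfalso
        rw [PySem.List.sorted_eq_nil_iff] at harr2
        simp only [List.map_eq_nil_iff] at harr2
        exact hFAne harr2
      have hsp : (y0 :: t).Perm (((PySem.Set.ofList (pvSA orders)).filter (fun k => PySem.Str.len k == c)).map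
            (fun k => (((pvSB orders c.toNat).count k : Int), k))) := by
        rw [← harr2]
        exact PySem.List.sorted_perm _ _ _
      have hy0arr := hsp.subset (List.mem_cons_self)
      obtain ⟨ky, hkyFA, hy0⟩ := List.mem_map.mp hy0arr
      have hy01 : y0.1 = ((pvSB orders c.toNat).count ky : Int) := by rw [← hy0]
      have hkySB : ky ∈ PySem.Set.ofList (pvSB orders c.toNat) := (hmemFA ky).mp hkyFA
      have hmaxarr : ∀ y ∈ (((PySem.Set.ofList (pvSA orders)).filter (fun k => PySem.Str.len k == c)).map
            (fun k => (((pvSB orders c.toNat).count k : Int), k))), y.1 ≤ y0.1 := by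
        intro y hy
        have := PySem.List.key_head_sorted_le _ _ harr2 y hy
        rw [Prod.Lex.toLex_le_toLex] at this
        rcases this with h | ⟨h, -⟩ <;> omega
      have hm_max := PySem.List.max?_isMax hm?
      rw [hvals] at hm_max
      have hm_mem := PySem.List.max?_mem hm?
      rw [hvals] at hm_mem
      obtain ⟨kM, hkMSB, hkM⟩ := List.mem_map.mp hm_mem
      have hle1 : y0.1 ≤ m := by
        have : ((pvSB orders c.toNat).count ky : Int) ∈ (PySem.Set.ofList (pvSB orders c.toNat)).map
            (fun k => ((pvSB orders c.toNat).count k : Int)) := List.mem_map_of_mem hkySB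
        have := hm_max _ this
        omega
      have hle2 : m ≤ y0.1 := by
        have hkMFA : kM ∈ (PySem.Set.ofList (pvSA orders)).filter (fun k => PySem.Str.len k == c) :=
          (hmemFA kM).mpr hkMSB
        have := hmaxarr _ (List.mem_map_of_mem (f := fun k => (((pvSB orders c.toNat).count k : Int), k)) hkMFA)
        simp only at this
        omega
      have hmy0 : m = y0.1 := by omega
      have hpos : 1 ≤ y0.1 := by
        rw [hy01]
        have : 0 < (pvSB orders c.toNat).count ky :=
          List.count_pos_iff.mpr ((PySem.Set.mem_ofList _ _).mp hkySB)
        omega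
      simp only []
      by_cases hone : (y0.1 == 1) = true
      · rw [if_pos hone]
        rw [beq_iff_eq] at hone
        rw [if_pos (by omega : m < 2)]
      · rw [if_neg hone]
        rw [beq_iff_eq] at hone
        rw [if_neg (by omega : ¬ m < 2)]
        rw [pvFindTake_eq]
        have hpw : (y0 :: t).Pairwise (fun a b => (toLex (-a.1, a.2) : Lex (Int × String)) ≤ toLex (-b.1, b.2)) := by
          rw [← harr2]
          exact PySem.List.sorted_pairwise _ _
        have hmaxl : ∀ y ∈ (y0 :: t), y.1 ≤ y0.1 := fun y hy => hmaxarr y (hsp.subset hy)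
        rw [pvTakeWhile_filter _ _ hpw hmaxl]
        rw [PySem.Dict.items_counter]
        have hA2 : (((((PySem.Set.ofList (pvSA orders)).filter (fun k => PySem.Str.len k == c)).map
              (fun k => (((pvSB orders c.toNat).count k : Int), k))).filter (fun x => y0.1 == x.1)).map (·.2))
            = ((PySem.Set.ofList (pvSA orders)).filter (fun k => PySem.Str.len k == c)).filter
              (fun k => y0.1 == ((pvSB orders c.toNat).count k : Int)) := by
          rw [List.filter_map, List.map_map]
          simp only [Function.comp_def]
          exact List.map_id _
        have hB2 : ((((PySem.Set.ofList (pvSB orders c.toNat)).map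
              (fun k => (k, ((pvSB orders c.toNat).count k : Int)))).filter (fun p => p.2 == m)).map (·.1))
            = (PySem.Set.ofList (pvSB orders c.toNat)).filter
              (fun k => ((pvSB orders c.toNat).count k : Int) == m) := by
          rw [List.filter_map, List.map_map]
          simp only [Function.comp_def]
          exact List.map_id _
        refine List.Perm.trans (List.Perm.map _ (hsp.filter _)) ?_
        rw [hA2, hB2]
        have hpredeq : (fun k => ((pvSB orders c.toNat).count k : Int) == m)
            = (fun k => y0.1 == ((pvSB orders c.toNat).count k : Int)) := by
          funext k
          rw [hmy0]
          simp [eq_comm]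
        rw [hpredeq]
        exact hFAperm.filter _

-- a course size below 2 or above every order's length wins nothing
lemma pvWinners_nil (orders : List String) (c : Int)
    (h : ¬ (2 ≤ c ∧ c ≤ orders.foldl (fun m o => max m (PySem.Str.len o)) 0)) :
    pvWinners orders c = [] := by
  unfold pvWinners
  by_cases hc : c < 2
  · rw [if_pos hc]
  · rw [if_neg hc]
    have hgt : orders.foldl (fun m o => max m (PySem.Str.len o)) 0 < c := by omega
    have hnil : pvSB orders c.toNat = [] := by
      unfold pvSB
      rw [List.flatMap_eq_nil_iff]
      intro o ho
      rw [show PySem.List.combinations o.toList c.toNat = [] from by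
        apply PySem.List.combinations_eq_nil_of_length_lt
        have hle := (PySem.List.le_foldl_max_int orders (fun o => PySem.Str.len o) 0).2 o ho
        have hlen : PySem.Str.len o = (o.toList.length : Int) := by simp [pysem]
        omega]
      simp
    rw [pvCntB_eq orders c (by omega), hnil]
    rw [if_pos (by decide)]

-- the winners cache: folding course with the memo dict appends exactly the per-size winners
lemma pvCache_eq (f : Int → List String) (cs : List Int) :
    ∀ (w : PySem.Dict Int (List String)) (ans : List String),
    (∀ k v, w.get? k = some v → v = f k) →
    (cs.foldl (fun st c =>
        let winners := if st.1.contains c then st.1 else st.1.insert c (f c)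
        (winners, st.2 ++ winners.getD c [])) (w, ans)).2
      = ans ++ cs.flatMap f := by
  induction cs with
  | nil =>
    intro w ans _
    simp
  | cons c cs ih =>
    intro w ans h
    simp only [List.foldl_cons, List.flatMap_cons]
    have hinv : ∀ k v, (if w.contains c then w else w.insert c (f c)).get? k = some v
        → v = f k := by
      intro k v hkv
      by_cases hct : w.contains c
      · rw [if_pos hct] at hkv
        exact h k v hkv
      · rw [if_neg hct] at hkv
        by_cases hk : k = c
        · subst hk
          rw [PySem.Dict.get?_insert_self] at hkv
          exact (Option.some.inj hkv).symm
        · rw [PySem.Dict.get?_insert_of_ne _ _ hk] at hkv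
          exact h k v hkv
    have hget : (if w.contains c then w else w.insert c (f c)).getD c []
        = f c := by
      by_cases hct : w.contains c
      · rw [if_pos hct]
        have hsome : (w.get? c).isSome := by
          rw [← PySem.Dict.contains_eq_isSome_get?]
          exact hct
        obtain ⟨v, hv⟩ := Option.isSome_iff_exists.mp hsome
        rw [PySem.Dict.getD_eq_get?_getD, hv, h c v hv]
        rfl
      · rw [if_neg hct, PySem.Dict.getD_insert_self]
    rw [ih _ _ hinv, hget, List.append_assoc]

-- ===== VERDICT (by name: the statement is the Claim_ definition above) =====
theorem solution_spec : Claim_equal_solution := by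
  intro orders course _
  unfold Spec_solution solution solution_alt
  dsimp only
  have hflatA : course.foldl (fun ans i => (pvFindOrder (pvDictA orders) i).foldl (fun ans j => ans ++ [j]) ans) []
      = course.flatMap (fun i => pvFindOrder (pvDictA orders) i) := by
    rw [PySem.List.foldl_congr_mem course _ (fun ans i => ans ++ pvFindOrder (pvDictA orders) i) []
      (fun acc x _ => PySem.List.foldl_append_singleton_eq_self _ _)]
    rw [PySem.List.foldl_append_eq_flatMap]
    simp
  have hflatB := pvCache_eq
    (fun c => if 2 ≤ c ∧ c ≤ orders.foldl (fun m o => max m (PySem.Str.len o)) 0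
      then pvWinners orders c else [])
    course PySem.Dict.empty []
    (fun k v hkv => by rw [PySem.Dict.get?_empty] at hkv; cases hkv)
  rw [hflatA, hflatB]
  simp only [List.nil_append]
  rw [PySem.List.sorted_id_eq_sorted_id_iff_perm]
  refine List.Perm.flatMap_left course (fun c _ => ?_)
  by_cases hg : 2 ≤ c ∧ c ≤ orders.foldl (fun m o => max m (PySem.Str.len o)) 0
  · rw [if_pos hg]
    exact pvContrib_perm orders c
  · rw [if_neg hg]
    have hp := pvContrib_perm orders c
    rwa [pvWinners_nil orders c hg] at hp
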